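-- pv_equiv track=rewrite | github.com/marjisound/electran_system | electran_project/questions/custom/question_classes/base_classes.py | spacing_binary_numbers
-- ===== SOURCE A (Python) =====
-- def spacing_binary_numbers(value):
--     modulo_value = len(value) % 4
--     separate_value = value[:modulo_value]
--     rest_of_value = value[modulo_value:]
--     result = ' '.join([rest_of_value[i:i + 4] for i in range(0, len(rest_of_value), 4)])
--     if separate_value:
--         result = separate_value + ' ' + result
--     return result
-- ===== SOURCE B (Python) =====
-- def spacing_binary_numbers(value):
--     parts = []
--     v = value
--     while len(v) >= 4:
--         parts.append(v[-4:])
--         v = v[:-4]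
--     parts.reverse()
--     rest = ' '.join(parts)
--     return v + ' ' + rest if v else rest
-- ===== Notes on version B (the rewrite author's own statement) =====
-- stated objective: alternative
-- what changed: B builds the groups by peeling 4 characters off the right end with a while loop and an accumulator (then reversing the collected groups), instead of A's modulo-computed prefix split plus a range/slice comprehension.
import Mathlib
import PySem

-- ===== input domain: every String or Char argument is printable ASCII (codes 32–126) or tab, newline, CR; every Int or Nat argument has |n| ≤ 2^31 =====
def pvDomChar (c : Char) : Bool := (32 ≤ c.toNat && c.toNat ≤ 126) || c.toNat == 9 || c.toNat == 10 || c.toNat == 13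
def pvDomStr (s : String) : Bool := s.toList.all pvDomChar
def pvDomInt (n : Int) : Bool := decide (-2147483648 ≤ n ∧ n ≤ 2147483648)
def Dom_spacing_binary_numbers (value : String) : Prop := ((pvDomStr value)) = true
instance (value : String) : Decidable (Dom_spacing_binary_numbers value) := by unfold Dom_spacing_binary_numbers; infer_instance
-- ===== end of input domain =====

-- B peels 4-character groups off the right end with a loop and an accumulator instead of A's
-- modulo-computed prefix split plus a range/slice comprehension (alternative decomposition, same results).

-- ===== PORT A =====
def spacing_binary_numbers (value : String) : String :=
  let v := value.toList
  let modulo_value : Int := PySem.Int.mod (PySem.List.len v) 4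
  let separate_value := PySem.List.slice v none (some modulo_value)
  let rest_of_value := PySem.List.slice v (some modulo_value) none
  let result := PySem.Chars.join [' ']
    ((PySem.List.pyRange 0 (PySem.List.len rest_of_value) 4).map
      (fun i => PySem.List.slice rest_of_value (some i) (some (i + 4))))
  String.ofList (if separate_value ≠ [] then separate_value ++ [' '] ++ result else result)

-- ===== PORT B =====
/-- B's while loop: while len(v) >= 4: parts.append(v[-4:]); v = v[:-4]. -/
def pvPeel (v : List Char) (parts : List (List Char)) : List Char × List (List Char) :=
  if h : 4 ≤ v.length then
    pvPeel (PySem.List.slice v none (some (-4)))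
      (parts ++ [PySem.List.slice v (some (-4)) none])
  else (v, parts)
termination_by v.length
decreasing_by
  rw [PySem.List.slice_to_neg_ofNat v 4 (by norm_num)]
  simp [List.length_take]
  omega

def spacing_binary_numbers_alt (value : String) : String :=
  let vp := pvPeel value.toList []
  let rest := PySem.Chars.join [' '] vp.2.reverse
  String.ofList (if vp.1 ≠ [] then vp.1 ++ [' '] ++ rest else rest)

-- ===== PRECONDITION & SPEC =====
def Spec_spacing_binary_numbers (value : String) (out : String) : Prop := out = spacing_binary_numbers_alt value
instance (value : String) (out : String) : Decidable (Spec_spacing_binary_numbers value out) := by unfold Spec_spacing_binary_numbers; infer_instance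

-- ===== CLAIM (what is proved, stated in full; the proofs are below) =====
def Claim_equal_spacing_binary_numbers : Prop := ∀ (value : String), Dom_spacing_binary_numbers value → Spec_spacing_binary_numbers value (spacing_binary_numbers value)

-- ===== LEMMAS AND PROOFS =====

/-- Greedy 4-chunks of a list, from the left (common normal form of both ports). -/
def chunks4 (l : List Char) : List (List Char) :=
  if h : l = [] then [] else l.take 4 :: chunks4 (l.drop 4)
termination_by l.length
decreasing_by
  simp only [List.length_drop]
  have := List.length_pos_of_ne_nil h
  omega

theorem chunks4_nil : chunks4 [] = [] := by rw [chunks4.eq_def]; simp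

theorem chunks4_cons (l : List Char) (h : l ≠ []) :
    chunks4 l = l.take 4 :: chunks4 (l.drop 4) := by
  rw [chunks4.eq_def]; simp [h]

theorem pr4_nil (a b : Int) (h : b ≤ a) : PySem.List.pyRange a b 4 = [] := by
  rw [PySem.List.pyRange_of_pos _ _ (by norm_num)]
  rw [if_neg (by omega)]
  simp

theorem pr4_cons (a b : Int) (h : a < b) :
    PySem.List.pyRange a b 4 = a :: PySem.List.pyRange (a + 4) b 4 := by
  rw [PySem.List.pyRange_of_pos _ _ (by norm_num : (0:Int) < 4),
      PySem.List.pyRange_of_pos _ _ (by norm_num : (0:Int) < 4)]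
  rw [if_pos h]
  have hN : ((b - a + 4 - 1) / 4).toNat
      = (if a + 4 < b then ((b - (a + 4) + 4 - 1) / 4).toNat else 0) + 1 := by
    split_ifs with h4 <;> omega
  rw [hN, List.range_succ_eq_map, List.map_cons, List.map_map]
  refine congrArg₂ _ (by simp) (List.map_congr_left ?_)
  intro k _
  simp [Function.comp, Nat.succ_eq_add_one]
  ring

theorem map_slice_pyRange_aux (m : Nat) : ∀ (l : List Char) (k : Nat), l.length ≤ k + m →
    (PySem.List.pyRange (k : Int) (l.length : Int) 4).map
      (fun i => PySem.List.slice l (some i) (some (i + 4))) = chunks4 (l.drop k) := by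
  induction m with
  | zero =>
    intro l k h
    rw [pr4_nil _ _ (by exact_mod_cast by omega)]
    rw [List.drop_eq_nil_of_le (by omega), chunks4_nil, List.map_nil]
  | succ m ih =>
    intro l k h
    by_cases hk : l.length ≤ k
    · rw [pr4_nil _ _ (by exact_mod_cast hk)]
      rw [List.drop_eq_nil_of_le hk, chunks4_nil, List.map_nil]
    · rw [pr4_cons _ _ (by exact_mod_cast by omega), List.map_cons]
      have hhead : PySem.List.slice l (some (k : Int)) (some ((k : Int) + 4))
          = (l.drop k).take 4 := by
        have : ((k : Int) + 4) = ((k : Int) + ((4 : Nat) : Int)) := by norm_num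
        rw [this, PySem.List.slice_natCast_add]
      have htail := ih l (k + 4) (by omega)
      have hcast : ((k : Int) + 4) = (((k + 4 : Nat)) : Int) := by push_cast; ring
      rw [hhead, hcast, htail, chunks4_cons (l.drop k) (by
        apply List.ne_nil_of_length_pos
        rw [List.length_drop]
        omega)]
      rw [List.drop_drop]

theorem map_slice_pyRange (l : List Char) :
    (PySem.List.pyRange 0 (l.length : Int) 4).map
      (fun i => PySem.List.slice l (some i) (some (i + 4))) = chunks4 l := by
  have := map_slice_pyRange_aux l.length l 0 (by omega)
  simpa using this

/-- Peeling the LAST 4-chunk off a list whose length is a positive multiple of 4. -/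
theorem chunks4_snoc_aux (m : Nat) : ∀ l : List Char, l.length ≤ m → l.length % 4 = 0 → l ≠ [] →
    chunks4 l = chunks4 (l.take (l.length - 4)) ++ [l.drop (l.length - 4)] := by
  induction m with
  | zero =>
    intro l h _ hne
    exact absurd (List.eq_nil_of_length_eq_zero (by omega)) hne
  | succ m ih =>
    intro l h hmod hne
    have hlen : 0 < l.length := List.length_pos_of_ne_nil hne
    by_cases h4 : l.length ≤ 4
    · have h4' : l.length = 4 := by omega
      rw [chunks4_cons l hne, List.take_of_length_le (by omega),
          List.drop_eq_nil_of_le (by omega), chunks4_nil]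
      rw [h4']
      simp [chunks4_nil]
    · have hge : 8 ≤ l.length := by omega
      rw [chunks4_cons l hne]
      have ihd := ih (l.drop 4) (by simp; omega) (by simp; omega)
        (by apply List.ne_nil_of_length_pos; rw [List.length_drop]; omega)
      have hlen4 : (l.drop 4).length = l.length - 4 := by simp
      rw [hlen4] at ihd
      rw [ihd]
      have htne : l.take (l.length - 4) ≠ [] := by
        apply List.ne_nil_of_length_pos
        rw [List.length_take]
        omega
      rw [chunks4_cons _ htne, List.take_take, min_eq_left (by omega), List.drop_take,
          List.drop_drop]
      have e1 : l.length - 4 - 4 = l.length - 8 := by omega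
      rw [e1]
      have e2 : (4 + (l.length - 8)) = l.length - 4 := by omega
      rw [e2]
      simp

theorem chunks4_snoc (l : List Char) (hmod : l.length % 4 = 0) (hne : l ≠ []) :
    chunks4 l = chunks4 (l.take (l.length - 4)) ++ [l.drop (l.length - 4)] :=
  chunks4_snoc_aux l.length l (by omega) hmod hne

/-- B's loop collects exactly the aligned 4-chunks, right to left, and leaves the short prefix. -/
theorem pvPeel_spec_aux (n : Nat) : ∀ (l : List Char) (parts : List (List Char)), l.length ≤ n →
    pvPeel l parts
      = (l.take (l.length % 4), parts ++ (chunks4 (l.drop (l.length % 4))).reverse) := by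
  induction n with
  | zero =>
    intro l parts h
    have hnil : l = [] := List.eq_nil_of_length_eq_zero (by omega)
    subst hnil
    rw [pvPeel.eq_def]
    simp [chunks4_nil]
  | succ n ih =>
    intro l parts h
    by_cases h4 : 4 ≤ l.length
    · rw [pvPeel.eq_def, dif_pos h4]
      rw [PySem.List.slice_to_neg_ofNat l 4 (by norm_num),
          PySem.List.slice_from_neg_ofNat l 4 (by norm_num)]
      have hlt : (l.take (l.length - 4)).length = l.length - 4 := by
        rw [List.length_take]; omega
      rw [ih (l.take (l.length - 4)) _ (by rw [hlt]; omega)]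
      rw [hlt]
      have hmod : (l.length - 4) % 4 = l.length % 4 := by omega
      rw [hmod]
      have hmle : l.length % 4 ≤ l.length - 4 := by omega
      refine Prod.ext ?_ ?_
      · show (l.take (l.length - 4)).take (l.length % 4) = l.take (l.length % 4)
        rw [List.take_take, min_eq_left (by omega)]
      · show parts ++ [l.drop (l.length - 4)]
            ++ (chunks4 ((l.take (l.length - 4)).drop (l.length % 4))).reverse
          = parts ++ (chunks4 (l.drop (l.length % 4))).reverse
        have hsn := chunks4_snoc (l.drop (l.length % 4))
          (by rw [List.length_drop]; omega)
          (by apply List.ne_nil_of_length_pos; rw [List.length_drop]; omega)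
        have hdl : (l.drop (l.length % 4)).length = l.length - l.length % 4 := by
          rw [List.length_drop]
        rw [hdl] at hsn
        have e1 : (l.drop (l.length % 4)).take (l.length - l.length % 4 - 4)
            = (l.take (l.length - 4)).drop (l.length % 4) := by
          rw [List.drop_take]
          congr 1
          omega
        have e2 : (l.drop (l.length % 4)).drop (l.length - l.length % 4 - 4)
            = l.drop (l.length - 4) := by
          rw [List.drop_drop]
          congr 1
          omega
        rw [e1, e2] at hsn
        rw [hsn]
        simp
    · rw [pvPeel.eq_def, dif_neg h4]
      have hm : l.length % 4 = l.length := by omega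
      rw [hm, List.take_length, List.drop_length, chunks4_nil]
      simp

theorem pvPeel_spec (l : List Char) :
    pvPeel l [] = (l.take (l.length % 4), (chunks4 (l.drop (l.length % 4))).reverse) := by
  have := pvPeel_spec_aux l.length l [] (by omega)
  simpa using this

theorem mod4_cast (n : Nat) : PySem.Int.mod ((n : Int)) 4 = ((n % 4 : Nat) : Int) := by
  simp [PySem.Int.mod, Int.fmod_eq_emod_of_nonneg]

-- ===== VERDICT (by name: the statement is the Claim_ definition above) =====
theorem spacing_binary_numbers_spec : Claim_equal_spacing_binary_numbers := by
  intro value _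
  unfold Spec_spacing_binary_numbers spacing_binary_numbers spacing_binary_numbers_alt
  simp only [PySem.List.len_eq]
  set l := value.toList with hl
  rw [mod4_cast, PySem.List.slice_to_natCast, PySem.List.slice_from_natCast]
  rw [map_slice_pyRange (l.drop (l.length % 4))]
  rw [pvPeel_spec l]
  simp
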